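-- pv_equiv track=rewrite | github.com/queelius/computational-explorations | src/new_attacks.py | max_ap_free_size
-- ===== SOURCE A (Python) =====
-- from typing import Set, List, Tuple, Dict, Optional
--
-- def is_ap_free(A: Set[int], k: int) -> bool:
--     """Check if A contains no k-term arithmetic progression."""
--     A_sorted = sorted(A)
--     A_set = set(A)
--     for i, a in enumerate(A_sorted):
--         for j in range(i + 1, len(A_sorted)):
--             d = A_sorted[j] - a
--             if d == 0:
--                 continue
--             # Check if a, a+d, a+2d, ..., a+(k-1)d are all in A
--             is_ap = True
--             for m in range(2, k):
--                 if a + m * d not in A_set: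
--                     is_ap = False
--                     break
--             if is_ap:
--                 return False
--     return True
--
-- def max_ap_free_size(N: int, k: int) -> Tuple[int, Set[int]]:
--     """Find maximum size of k-AP-free set in [N] by greedy."""
--     best = set()
--     current = set()
--
--     for x in range(1, N + 1):
--         # Try to add x
--         test = current | {x}
--         if is_ap_free(test, k):
--             current.add(x)
--
--     return len(current), current
-- ===== SOURCE B (Python) =====
-- def max_ap_free_size(N: int, k: int):
--     """Find maximum size of k-AP-free set in [N] by greedy, checking
--     incrementally: x is the largest candidate, so a new progression must
--     end at x, and its second-to-last term x-d must already be chosen.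
--     So for each chosen a (taking d = x - a), test whether the remaining
--     k-2 earlier terms x-2d, x-3d, ... are all present; a lone element is
--     always allowed."""
--     need = max(k - 1, 1)
--     current = set()
--     for x in range(1, N + 1):
--         blocked = any(
--             all(x - m * (x - a) in current for m in range(2, need + 1))
--             for a in current)
--         if not blocked:
--             current.add(x)
--     return len(current), current
-- ===== Notes on version B (the rewrite author's own statement) =====
-- stated objective: faster
-- what changed: Instead of re-running the full pairwise AP-freeness check on the whole candidate set at every greedy step, B checks incrementally: the new element x is the maximum, so a new progression must end at x with its second-to-last term already chosen; B tests, for each chosen a (difference d = x - a), whether the remaining earlier terms are present via set lookups.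
import Mathlib
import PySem

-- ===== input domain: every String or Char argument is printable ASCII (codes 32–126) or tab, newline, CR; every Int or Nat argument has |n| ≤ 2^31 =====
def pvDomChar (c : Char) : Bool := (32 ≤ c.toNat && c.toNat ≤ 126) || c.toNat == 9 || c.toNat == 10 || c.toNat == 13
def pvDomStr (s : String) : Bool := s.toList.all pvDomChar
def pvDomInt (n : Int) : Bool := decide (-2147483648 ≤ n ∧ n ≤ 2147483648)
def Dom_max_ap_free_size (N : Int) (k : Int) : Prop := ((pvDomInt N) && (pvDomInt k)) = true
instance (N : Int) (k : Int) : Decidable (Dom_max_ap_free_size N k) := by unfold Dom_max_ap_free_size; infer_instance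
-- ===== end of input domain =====

-- B replaces A's full O(|set|^2·k) re-check of the whole candidate set at every greedy step by an
-- incremental check of only the progressions ENDING at the new (maximal) element x — an
-- asymptotically faster algorithm with the same greedy result.

-- ===== PORT A =====
-- inner 'for m in range(2, k)' loop of is_ap_free (early break on the first missing term)
def apfInner (aset : PySem.Set Int) (a d m k : Int) : Bool :=
  if _h : m < k then
    if PySem.Set.contains aset (a + m * d) then apfInner aset a d (m + 1) k else false
  else true
termination_by (k - m).toNat
decreasing_by omega

-- body of the two nested pair loops of is_ap_free, for one pair (a, b) of sorted elements
def apfPair (aset : PySem.Set Int) (k a b : Int) : Bool :=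
  let d := b - a
  if d == 0 then false
  else apfInner aset a d 2 k

-- the two outer loops of is_ap_free: scan all ordered pairs of the sorted list, early-return on hit
def apfScan (aset : PySem.Set Int) (k : Int) : List Int → Bool
  | [] => false
  | a :: rest => rest.any (fun b => apfPair aset k a b) || apfScan aset k rest

def is_ap_free (A : PySem.Set Int) (k : Int) : Bool :=
  let aSorted := PySem.List.sorted A (fun x => x) false
  let aSet := PySem.Set.ofList A
  ! apfScan aSet k aSorted

def max_ap_free_size (N : Int) (k : Int) : Int × List Int :=
  let current := (PySem.List.pyRange 1 (N + 1) 1).foldl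
    (fun cur x =>
      let test := PySem.Set.union cur [x]      -- current | {x}
      if is_ap_free test k then PySem.Set.add cur x else cur)
    ([] : PySem.Set Int)
  ((current.length : Int), current)

-- ===== PORT B =====
-- Source B's 'all(x - m*(x-a) in current for m in range(2, need+1))' (early exit on a missing term)
def altInner (cur : PySem.Set Int) (x d m stop : Int) : Bool :=
  if _h : m < stop then
    if PySem.Set.contains cur (x - m * d) then altInner cur x d (m + 1) stop else false
  else true
termination_by (stop - m).toNat
decreasing_by omega

-- 'blocked' test of Source B: some chosen a (as second-to-last term, d = x - a) has the
-- remaining earlier terms x-2d, …, x-need·d all present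
def altBlocked (cur : PySem.Set Int) (need x : Int) : Bool :=
  cur.any (fun a => altInner cur x (x - a) 2 (need + 1))

def max_ap_free_size_alt (N : Int) (k : Int) : Int × List Int :=
  let need := max (k - 1) 1
  let current := (PySem.List.pyRange 1 (N + 1) 1).foldl
    (fun cur x => if altBlocked cur need x then cur else PySem.Set.add cur x)
    ([] : PySem.Set Int)
  ((current.length : Int), current)

-- ===== PRECONDITION & SPEC =====
def Spec_max_ap_free_size (N : Int) (k : Int) (out : Int × List Int) : Prop := out = max_ap_free_size_alt N k
instance (N : Int) (k : Int) (out : Int × List Int) : Decidable (Spec_max_ap_free_size N k out) := by unfold Spec_max_ap_free_size; infer_instance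

-- ===== CLAIM (what is proved, stated in full; the proofs are below) =====
def Claim_equal_max_ap_free_size : Prop := ∀ (N : Int) (k : Int), Dom_max_ap_free_size N k → Spec_max_ap_free_size N k (max_ap_free_size N k)

-- ===== LEMMAS AND PROOFS =====

-- the early-exit inner loop of A checks exactly all terms a + m·d, m ∈ [m0, k)
theorem apfInner_iff (aset : PySem.Set Int) (a d : Int) (n : Nat) :
    ∀ m k : Int, (k - m).toNat ≤ n →
      (apfInner aset a d m k = true ↔ ∀ j, m ≤ j → j < k → (a + j * d) ∈ aset) := by
  induction n with
  | zero =>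
    intro m k h
    rw [apfInner]
    have hmk : ¬ m < k := by omega
    simp only [hmk, dif_neg, not_false_eq_true, true_iff]
    intro j h1 h2; omega
  | succ n ih =>
    intro m k h
    rw [apfInner]
    split_ifs with hmk hc
    · rw [ih (m + 1) k (by omega)]
      constructor
      · intro hall j h1 h2
        rcases (by omega : j = m ∨ m + 1 ≤ j) with rfl | hj
        · exact (PySem.Set.contains_iff _ _).mp hc
        · exact hall j hj h2
      · intro hall j h1 h2
        exact hall j (by omega) h2
    · simp only [false_iff]
      intro hall
      exact hc ((PySem.Set.contains_iff _ _).mpr (hall m le_rfl hmk))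
    · simp only [true_iff]
      intro j h1 h2; omega

-- the early-exit inner loop of B checks exactly all terms x - m·d, m ∈ [m0, stop)
theorem altInner_iff (cur : PySem.Set Int) (x d : Int) (n : Nat) :
    ∀ m stop : Int, (stop - m).toNat ≤ n →
      (altInner cur x d m stop = true ↔ ∀ j, m ≤ j → j < stop → (x - j * d) ∈ cur) := by
  induction n with
  | zero =>
    intro m stop h
    rw [altInner]
    have hmk : ¬ m < stop := by omega
    simp only [hmk, dif_neg, not_false_eq_true, true_iff]
    intro j h1 h2; omega
  | succ n ih =>
    intro m stop h
    rw [altInner]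
    split_ifs with hmk hc
    · rw [ih (m + 1) stop (by omega)]
      constructor
      · intro hall j h1 h2
        rcases (by omega : j = m ∨ m + 1 ≤ j) with rfl | hj
        · exact (PySem.Set.contains_iff _ _).mp hc
        · exact hall j hj h2
      · intro hall j h1 h2
        exact hall j (by omega) h2
    · simp only [false_iff]
      intro hall
      exact hc ((PySem.Set.contains_iff _ _).mpr (hall m le_rfl hmk))
    · simp only [true_iff]
      intro j h1 h2; omega

-- characterisation of B's blocked test: on elements of [1, x) it is exactly
-- 'some difference d ≥ 1 has all need earlier terms x-d, …, x-need·d present'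
theorem altBlocked_true_iff (cur : PySem.Set Int) (need x : Int)
    (hbd : ∀ a ∈ cur, 1 ≤ a ∧ a < x) (hneed1 : 1 ≤ need) :
    altBlocked cur need x = true ↔
      ∃ d, 1 ≤ d ∧ d < x ∧ ∀ m, 1 ≤ m → m ≤ need → (x - m * d) ∈ cur := by
  simp only [altBlocked, List.any_eq_true]
  have hinner : ∀ a : Int, altInner cur x (x - a) 2 (need + 1) = true ↔
      ∀ j, 2 ≤ j → j < need + 1 → (x - j * (x - a)) ∈ cur :=
    fun a => altInner_iff cur x (x - a) (need - 1).toNat 2 (need + 1) (by omega)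
  constructor
  · rintro ⟨a, ha, h3⟩
    rw [hinner a] at h3
    refine ⟨x - a, by have := hbd a ha; omega, by have := hbd a ha; omega, ?_⟩
    intro m hm1 hm2
    rcases (by omega : m = 1 ∨ 2 ≤ m) with rfl | hm
    · have he : x - 1 * (x - a) = a := by ring
      rw [he]; exact ha
    · exact h3 m hm (by omega)
  · rintro ⟨d, h1, h2, h3⟩
    have ha : x - d ∈ cur := by
      have := h3 1 le_rfl hneed1
      rwa [one_mul] at this
    refine ⟨x - d, ha, ?_⟩
    rw [hinner (x - d)]
    intro j hj1 hj2
    have he : x - j * (x - (x - d)) = x - j * d := by ring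
    rw [he]
    exact h3 j (by omega) (by omega)

-- characterisation of A's inner pair test, with range(2,k) rewritten through need = max (k-1) 1
theorem apfPair_true_iff (aset : PySem.Set Int) (k a b : Int) :
    apfPair aset k a b = true ↔
      b - a ≠ 0 ∧ ∀ m, 2 ≤ m → m ≤ max (k - 1) 1 → (a + m * (b - a)) ∈ aset := by
  simp only [apfPair]
  split_ifs with h
  · simp only [false_iff]
    intro hc; exact hc.1 (by simpa using h)
  · have hd : b - a ≠ 0 := by simpa using h
    rw [apfInner_iff aset a (b - a) (k - 2).toNat 2 k (by omega)]
    constructor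
    · intro h3
      exact ⟨hd, fun m hm1 hm2 => h3 m hm1 (by omega)⟩
    · rintro ⟨_, h3⟩ m hm1 hm2
      exact h3 m hm1 (by omega)

-- A's pair scan on a strictly increasing list finds a violating pair iff one exists as a set
theorem apfScan_true_iff (aset : PySem.Set Int) (k : Int) (L : List Int)
    (hs : L.Pairwise (· < ·)) :
    apfScan aset k L = true ↔
      ∃ a b, a ∈ L ∧ b ∈ L ∧ a < b ∧ apfPair aset k a b = true := by
  induction L with
  | nil => simp [apfScan]
  | cons c rest ih =>
    rcases List.pairwise_cons.mp hs with ⟨hc, hrest⟩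
    simp only [apfScan, Bool.or_eq_true, List.any_eq_true, ih hrest]
    constructor
    · rintro (⟨b, hb, hp⟩ | ⟨a, b, ha, hb, hab, hp⟩)
      · exact ⟨c, b, List.mem_cons_self, List.mem_cons_of_mem _ hb, hc b hb, hp⟩
      · exact ⟨a, b, List.mem_cons_of_mem _ ha, List.mem_cons_of_mem _ hb, hab, hp⟩
    · rintro ⟨a, b, ha, hb, hab, hp⟩
      rcases List.mem_cons.mp hb with hbc | hbr
      · subst hbc
        rcases List.mem_cons.mp ha with hac | har
        · omega
        · exact absurd hab (by have := hc a har; omega)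
      · rcases List.mem_cons.mp ha with hac | har
        · subst hac
          exact Or.inl ⟨b, hbr, hp⟩
        · exact Or.inr ⟨a, b, har, hbr, hab, hp⟩

-- the crux: on a strictly increasing AP-free cur, all of whose elements lie in [1, x),
-- A's full re-check of cur ∪ {x} agrees with B's incremental check of progressions ending at x
theorem crux (cur : PySem.Set Int) (k x : Int)
    (hsort : cur.Pairwise (· < ·))
    (hbd : ∀ a ∈ cur, 1 ≤ a ∧ a < x)
    (hx : 1 ≤ x)
    (hfree : apfScan cur k cur = false) :
    apfScan (cur ++ [x]) k (cur ++ [x]) = altBlocked cur (max (k - 1) 1) x := by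
  set need := max (k - 1) 1 with hneed
  have hneed1 : 1 ≤ need := by omega
  have hTsort : (cur ++ [x]).Pairwise (· < ·) := by
    rw [List.pairwise_append]
    exact ⟨hsort, List.pairwise_singleton _ _, fun a ha b hb => by
      simp at hb; subst hb; exact (hbd a ha).2⟩
  have hTmem : ∀ t ∈ cur ++ [x], 1 ≤ t ∧ t ≤ x := by
    intro t ht
    rcases List.mem_append.mp ht with h | h
    · have := hbd t h; omega
    · simp at h; subst h
      exact ⟨hx, le_refl t⟩
  rw [Bool.eq_iff_iff, apfScan_true_iff _ _ _ hTsort, altBlocked_true_iff cur need x hbd hneed1]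
  constructor
  · -- A finds a violating pair in cur ∪ {x} → it must form a progression ending at x
    rintro ⟨a, b, ha, hb, hab, hp⟩
    rcases (apfPair_true_iff _ _ _ _).mp hp with ⟨hd0, hterms⟩
    set d := b - a with hdd
    have hd : 1 ≤ d := by omega
    -- each term a + m*d with 0 ≤ m ≤ need is in cur ++ [x]
    have hterm : ∀ m, 0 ≤ m → m ≤ need → (a + m * d) ∈ cur ++ [x] := by
      intro m hm1 hm2
      rcases (by omega : m = 0 ∨ m = 1 ∨ 2 ≤ m) with rfl | rfl | hm
      · simpa using ha
      · simpa [hdd] using hb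
      · exact hterms m hm hm2
    -- the top term a + need*d must be x (it is in the list, hence ≤ x, and is the maximal term)
    have htop : a + need * d = x := by
      by_contra hne
      -- then no term a + m*d (0 ≤ m ≤ need) equals x, hence all are in cur
      have hcur : ∀ m, 0 ≤ m → m ≤ need → (a + m * d) ∈ cur := by
        intro m hm1 hm2
        rcases List.mem_append.mp (hterm m hm1 hm2) with h | h
        · exact h
        · simp at h
          -- a + m*d = x; then a + need*d ≥ x + (need-m)*d > x if m < need, contradiction with ≤ x
          exfalso
          have hmlt : m < need := by
            rcases (by omega : m < need ∨ m = need) with h' | h'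
            · exact h'
            · exact absurd (h' ▸ h) hne
          have htop_mem := hterm need (by omega) le_rfl
          have hle := (hTmem _ htop_mem).2
          nlinarith [mul_le_mul_of_nonneg_right (by omega : m + 1 ≤ need) (by omega : (0:Int) ≤ d)]
      -- so the violation lies entirely inside cur, contradicting hfree
      have : apfScan cur k cur = true := by
        rw [apfScan_true_iff _ _ _ hsort]
        have ha' : a ∈ cur := by simpa using hcur 0 le_rfl (by omega)
        have hb' : b ∈ cur := by
          have h1 := hcur 1 (by omega) hneed1
          have he : a + 1 * d = b := by rw [hdd]; ring
          rwa [he] at h1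
        refine ⟨a, b, ha', hb', hab, ?_⟩
        rw [apfPair_true_iff]
        exact ⟨hd0, fun m hm1 hm2 => hcur m (by omega) hm2⟩
      rw [hfree] at this; exact absurd this (by simp)
    -- conclude: the need preceding terms x - m*d are all in cur, and 1 ≤ d < x
    have hpre : ∀ m, 1 ≤ m → m ≤ need → (x - m * d) ∈ cur := by
      intro m hm1 hm2
      have hx : x - m * d = a + (need - m) * d := by rw [← htop]; ring
      have hmem := hterm (need - m) (by omega) (by omega)
      rw [← hx] at hmem
      rcases List.mem_append.mp hmem with h | h
      · exact h
      · exfalso; simp at h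
        have hpos : 0 < m * d := mul_pos (by omega) (by omega)
        omega
    have hdx : d < x := by
      have := (hbd _ (hpre 1 le_rfl hneed1)).1; omega
    exact ⟨d, hd, hdx, hpre⟩
  · -- B finds d with all need preceding terms present → A finds the pair (x-need·d, x-(need-1)·d)
    rintro ⟨d, hd1, hdx, hpre⟩
    refine ⟨x - need * d, x - (need - 1) * d, List.mem_append_left _ (hpre need hneed1 le_rfl), ?_, by nlinarith, ?_⟩
    · rcases (by omega : need = 1 ∨ 2 ≤ need) with h1 | h2
      · simp [h1]
      · exact List.mem_append_left _ (hpre (need - 1) (by omega) (by omega))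
    · rw [apfPair_true_iff]
      have hdd : x - (need - 1) * d - (x - need * d) = d := by ring
      rw [hdd]
      refine ⟨by omega, fun m hm1 hm2 => ?_⟩
      have hx : x - need * d + m * d = x - (need - m) * d := by ring
      rw [hx]
      rcases (by omega : need - m = 0 ∨ 1 ≤ need - m) with h0 | h1
      · rw [h0]; simp
      · exact List.mem_append_left _ (hpre (need - m) h1 (by omega))

-- one greedy step of A equals one greedy step of B, and the invariant is preserved
theorem step_eq (k x : Int) (cur : PySem.Set Int)
    (hsort : cur.Pairwise (· < ·))
    (hbd : ∀ a ∈ cur, 1 ≤ a ∧ a < x)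
    (hfree : apfScan cur k cur = false) (hx : 1 ≤ x) :
    (let test := PySem.Set.union cur [x]
     if is_ap_free test k then PySem.Set.add cur x else cur)
      = (if altBlocked cur (max (k - 1) 1) x then cur else PySem.Set.add cur x) ∧
    ∃ cur', (if altBlocked cur (max (k - 1) 1) x then cur else PySem.Set.add cur x) = cur' ∧
      cur'.Pairwise (· < ·) ∧ (∀ a ∈ cur', 1 ≤ a ∧ a < x + 1) ∧ apfScan cur' k cur' = false := by
  have hxnm : x ∉ cur := fun h => by have := (hbd x h).2; omega
  have hadd : PySem.Set.add cur x = cur ++ [x] := PySem.Set.add_of_not_mem hxnm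
  have hunion : PySem.Set.union cur [x] = cur ++ [x] := by
    show PySem.Set.update cur [x] = _
    simp [PySem.Set.update, hadd]
  have hnodup : (cur ++ [x]).Nodup := by
    have : (cur ++ [x]).Pairwise (· < ·) := by
      rw [List.pairwise_append]
      exact ⟨hsort, List.pairwise_singleton _ _, fun a ha b hb => by
        simp at hb; subst hb; exact (hbd a ha).2⟩
    exact this.imp (fun h => by omega) |>.nodup
  have hTsort : (cur ++ [x]).Pairwise (· < ·) := by
    rw [List.pairwise_append]
    exact ⟨hsort, List.pairwise_singleton _ _, fun a ha b hb => by
      simp at hb; subst hb; exact (hbd a ha).2⟩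
  have hfreeT : is_ap_free (PySem.Set.union cur [x]) k = ! altBlocked cur (max (k - 1) 1) x := by
    rw [hunion]
    simp only [is_ap_free]
    rw [PySem.Set.ofList_eq_self_of_nodup _ hnodup,
        PySem.List.sorted_eq_self_of_pairwise _ _ (hTsort.imp le_of_lt),
        crux cur k x hsort hbd hx hfree]
  constructor
  · simp only [hfreeT]
    by_cases h : altBlocked cur (max (k - 1) 1) x = true <;> simp [h]
  · by_cases h : altBlocked cur (max (k - 1) 1) x = true
    · refine ⟨cur, by simp [h], hsort, fun a ha => by have := hbd a ha; omega, hfree⟩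
    · refine ⟨cur ++ [x], by simp [h, hadd], hTsort,
        fun a ha => ?_, ?_⟩
      · rcases List.mem_append.mp ha with h' | h'
        · have := hbd a h'; omega
        · simp at h'; omega
      · -- cur ++ [x] is AP-free: A's check on it equals B's blocked test, which is false
        have := crux cur k x hsort hbd hx hfree
        rw [this]
        simpa using h

-- the whole greedy folds agree and keep the invariant, by induction on n (the range [1..n])
theorem fold_eq (k : Int) (n : Nat) :
    ∃ cur : PySem.Set Int,
      (PySem.List.pyRange 1 ((n : Int) + 1) 1).foldl
        (fun cur x =>
          let test := PySem.Set.union cur [x]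
          if is_ap_free test k then PySem.Set.add cur x else cur) ([] : PySem.Set Int) = cur ∧
      (PySem.List.pyRange 1 ((n : Int) + 1) 1).foldl
        (fun cur x => if altBlocked cur (max (k - 1) 1) x then cur else PySem.Set.add cur x)
        ([] : PySem.Set Int) = cur ∧
      cur.Pairwise (· < ·) ∧ (∀ a ∈ cur, 1 ≤ a ∧ a < (n : Int) + 1) ∧
      apfScan cur k cur = false := by
  induction n with
  | zero =>
    refine ⟨[], ?_, ?_, by simp, by simp, by simp [apfScan]⟩ <;>
      rw [PySem.List.pyRange_one_eq_nil (by omega)] <;> rfl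
  | succ n ih =>
    rcases ih with ⟨cur, hA, hB, hsort, hbd, hfree⟩
    have hsplit : PySem.List.pyRange 1 ((n : Int) + 1 + 1) 1
        = PySem.List.pyRange 1 ((n : Int) + 1) 1 ++ [(n : Int) + 1] :=
      PySem.List.pyRange_one_succ_right (by omega)
    have hstep := step_eq k ((n : Int) + 1) cur hsort hbd hfree (by omega)
    rcases hstep.2 with ⟨cur', hcur', hsort', hbd', hfree'⟩
    refine ⟨cur', ?_, ?_, hsort', by intro a ha; have := hbd' a ha; push_cast; omega, hfree'⟩
    · push_cast
      rw [hsplit, List.foldl_append, hA]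
      simpa [hcur'] using hstep.1
    · push_cast
      rw [hsplit, List.foldl_append, hB]
      exact hcur'

-- ===== VERDICT (by name: the statement is the Claim_ definition above) =====
theorem max_ap_free_size_spec : Claim_equal_max_ap_free_size := by
  intro N k _
  show max_ap_free_size N k = max_ap_free_size_alt N k
  unfold max_ap_free_size max_ap_free_size_alt
  by_cases hN : N ≤ 0
  · rw [PySem.List.pyRange_one_eq_nil (by omega)]; rfl
  · rw [not_le] at hN
    obtain ⟨n, rfl⟩ : ∃ n : Nat, N = (n : Int) := ⟨N.toNat, by omega⟩
    rcases fold_eq k n with ⟨cur, hA, hB, _, _, _⟩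
    simp only [hA, hB]
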